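-- pv_equiv track=rewrite | github.com/nnqtruong/CodePath | Unit2/Session2Unit2/Problem3.py | organize_exhibition
-- ===== SOURCE A (Python) =====
-- def organize_exhibition(collection):
--     from collections import Counter
--     art_collection = Counter(collection)
--     gallery_wall = []
--
--     for i in range(max(art_collection.values())):
--         new_array =  [k for k, v in art_collection.items() if v > i]
--         gallery_wall.append(new_array)
--     return gallery_wall
-- ===== SOURCE B (Python) =====
-- def organize_exhibition(collection):
--     counts = {}
--     for x in collection:
--         counts[x] = counts.get(x, 0) + 1
--     walls = []
--     for k, c in counts.items():
--         for i in range(c):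
--             if i == len(walls):
--                 walls.append([k])
--             else:
--                 walls[i].append(k)
--     return walls
-- ===== Notes on version B (the rewrite author's own statement) =====
-- stated objective: alternative
-- what changed: A rebuilds every gallery level by rescanning all Counter items once per level (max_count passes over the distinct keys); B makes a single pass over the distinct keys, appending each key to walls 0..count-1, so each (key, level) pair is touched once.
import Mathlib
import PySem

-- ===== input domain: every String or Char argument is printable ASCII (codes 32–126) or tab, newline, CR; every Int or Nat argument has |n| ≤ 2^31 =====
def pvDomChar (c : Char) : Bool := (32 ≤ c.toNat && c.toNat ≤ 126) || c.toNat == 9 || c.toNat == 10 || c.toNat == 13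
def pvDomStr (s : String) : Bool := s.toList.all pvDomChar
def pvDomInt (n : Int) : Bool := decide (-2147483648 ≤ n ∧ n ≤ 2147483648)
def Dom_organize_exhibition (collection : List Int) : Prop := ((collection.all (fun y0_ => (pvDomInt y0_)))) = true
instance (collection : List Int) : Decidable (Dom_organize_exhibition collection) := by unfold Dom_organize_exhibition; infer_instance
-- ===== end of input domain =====

-- B replaces A's per-level rescan of the Counter (one pass over all distinct keys for every level
-- up to the maximum count) by a single pass over the distinct keys that appends each key to
-- walls 0..count-1; equality of the returned value is proved on all non-empty lists.

-- ===== PORT A =====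
def organize_exhibition (collection : List Int) : List (List Int) :=
  let art := PySem.Dict.counter collection
  match PySem.List.max? art.values (fun v => v) with
  | none => []   -- max() of an empty sequence raises ValueError; excluded by Pre_
  | some m =>
      (PySem.List.pyRange 0 m 1).foldl
        (fun gw i => gw ++ [(art.items.filter (fun kv => decide (kv.2 > i))).map (·.1)]) []

-- ===== PORT B =====
-- inner loop 'for i in range(c): if i == len(walls): walls.append([k]) else: walls[i].append(k)'
-- (i counts up one at a time, so i is always in range for pyGetD/pySetD)
def bAddKey (walls : List (List Int)) (k : Int) (c : Int) : List (List Int) :=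
  (PySem.List.pyRange 0 c 1).foldl
    (fun w i =>
      if i = (w.length : Int) then w ++ [[k]]
      else PySem.List.pySetD w i (PySem.List.pyGetD w i [] ++ [k]))
    walls

def organize_exhibition_alt (collection : List Int) : List (List Int) :=
  let counts := collection.foldl (fun d x => d.insert x (d.getD x 0 + 1)) PySem.Dict.empty
  counts.items.foldl (fun walls kc => bAddKey walls kc.1 kc.2) []

-- ===== PRECONDITION & SPEC =====
-- Pre_ excludes only the empty list, on which A's max() raises ValueError.
def Pre_organize_exhibition (collection : List Int) : Prop := collection ≠ []
instance (collection : List Int) : Decidable (Pre_organize_exhibition collection) := by unfold Pre_organize_exhibition; infer_instance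
def pvWitness_organize_exhibition : List Int := [1, 2, 2, 3, 3, 3]

def Spec_organize_exhibition (collection : List Int) (out : List (List Int)) : Prop := out = organize_exhibition_alt collection
instance (collection : List Int) (out : List (List Int)) : Decidable (Spec_organize_exhibition collection out) := by unfold Spec_organize_exhibition; infer_instance

-- ===== CLAIM (what is proved, stated in full; the proofs are below) =====
def Claim_equal_organize_exhibition : Prop := ∀ (collection : List Int), Dom_organize_exhibition collection → Pre_organize_exhibition collection → Spec_organize_exhibition collection (organize_exhibition collection)

-- ===== LEMMAS AND PROOFS =====

-- setting one slot of a mapped range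
lemma set_map_range {α : Type} (g : Nat → α) (N j : Nat) (v : α) :
    ((List.range N).map g).set j v = (List.range N).map (fun i => if i = j then v else g i) := by
  apply List.ext_getElem
  · simp
  · intro i h1 h2
    simp only [List.getElem_set, List.getElem_map, List.getElem_range]
    by_cases hij : i = j
    · simp [hij]
    · simp only [hij, if_false]
      rw [if_neg (fun h => hij h.symm)]

-- shape of B's inner loop on a wall list of the canonical form
lemma bAddKey_shape (g : Nat → List Int) (M : Nat) (k : Int) (c : Nat) :
    bAddKey ((List.range M).map g) k (c : Int) =
      (List.range (max M c)).map
        (fun i => (if i < M then g i else []) ++ (if i < c then [k] else [])) := by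
  induction c with
  | zero =>
      simp only [Nat.cast_zero, bAddKey, PySem.List.pyRange_one_eq_nil (le_refl 0),
        List.foldl_nil, Nat.max_zero]
      refine (List.map_congr_left fun a ha => ?_).symm
      have ha' : a < M := List.mem_range.mp ha
      simp [ha']
  | succ c ih =>
      have hr : PySem.List.pyRange 0 ((c : Int) + 1) 1 =
          PySem.List.pyRange 0 (c : Int) 1 ++ [(c : Int)] :=
        PySem.List.pyRange_one_succ_right (by positivity)
      have hstep : bAddKey ((List.range M).map g) k ((c + 1 : Nat) : Int) =
          (fun w (i : Int) =>
            if i = (w.length : Int) then w ++ [[k]]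
            else PySem.List.pySetD w i (PySem.List.pyGetD w i [] ++ [k]))
            (bAddKey ((List.range M).map g) k (c : Int)) (c : Int) := by
        simp only [bAddKey]
        push_cast
        rw [hr, List.foldl_append, List.foldl_cons, List.foldl_nil]
      rw [hstep, ih]
      beta_reduce
      set h : Nat → List Int :=
        fun i => (if i < M then g i else []) ++ (if i < c then [k] else []) with hh
      by_cases hMc : M ≤ c
      · have hN : max M c = c := Nat.max_eq_right hMc
        have hN' : max M (c + 1) = c + 1 := Nat.max_eq_right (by omega)
        rw [hN, hN']
        rw [if_pos (by simp)]
        rw [List.range_succ, List.map_append, List.map_singleton]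
        congr 1
        · refine List.map_congr_left fun a ha => ?_
          have ha' : a < c := List.mem_range.mp ha
          have h1 : (a < c) = (a < c + 1) := propext (by omega)
          simp only [hh, h1]
        · simp [Nat.not_lt.mpr hMc]
      · have hcM : c < M := Nat.lt_of_not_le hMc
        have hN : max M c = M := Nat.max_eq_left (by omega)
        have hN' : max M (c + 1) = M := Nat.max_eq_left (by omega)
        rw [hN, hN']
        have hne : (c : Int) ≠ (((List.range M).map h).length : Int) := by
          simp only [List.length_map, List.length_range]
          exact_mod_cast Nat.ne_of_lt hcM
        rw [if_neg hne]
        rw [PySem.List.pyGetD_natCast, PySem.List.pySetD_natCast]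
        have hget : ((List.range M).map h).getD c [] = h c := by
          rw [List.getD_eq_getElem _ _ (by simpa using hcM)]
          simp
        rw [hget, set_map_range]
        refine List.map_congr_left fun a ha => ?_
        have ha' : a < M := List.mem_range.mp ha
        by_cases hac : a = c
        · subst hac
          simp [hh, hcM]
        · have h1 : (a < c) = (a < c + 1) := propext (by omega)
          simp only [if_neg hac, hh, h1]

-- running max of the level counts (A's range bound / B's final wall count)
def maxCnt (items : List (Int × Int)) : Nat :=
  items.foldl (fun a kv => max a kv.2.toNat) 0

lemma maxCnt_le (l : List (Int × Int)) (a b : Nat) (ha : a ≤ b)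
    (h : ∀ kv ∈ l, kv.2.toNat ≤ b) : l.foldl (fun acc kv => max acc kv.2.toNat) a ≤ b := by
  induction l generalizing a with
  | nil => simpa
  | cons x t ih =>
      simp only [List.foldl_cons]
      exact ih _ (by simp [ha, h x (by simp)]) (fun kv hkv => h kv (by simp [hkv]))

lemma filter_gt_eq_nil (t : List (Int × Int)) (i : Nat)
    (h1 : ∀ kv ∈ t, 1 ≤ kv.2) (hM : maxCnt t ≤ i) :
    t.filter (fun kv => decide ((i : Int) < kv.2)) = [] := by
  rw [List.filter_eq_nil_iff]
  intro kv hkv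
  have h2 := (PySem.List.le_foldl_max_nat t (fun kv => kv.2.toNat) 0).2 kv hkv
  have h3 := h1 kv hkv
  simp only [decide_eq_true_eq, not_lt]
  unfold maxCnt at hM
  omega

-- shape of B's outer loop: level i holds the first components of the items whose count exceeds i
lemma walls_shape (items : List (Int × Int)) (h1 : ∀ kv ∈ items, 1 ≤ kv.2) :
    items.foldl (fun w kc => bAddKey w kc.1 kc.2) [] =
      (List.range (maxCnt items)).map
        (fun (i : Nat) => ((items.filter (fun kv => decide ((i : Int) < kv.2))).map (·.1))) := by
  induction items using List.reverseRecOn with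
  | nil => simp [maxCnt]
  | append_singleton t kc ih =>
      have ht : ∀ kv ∈ t, 1 ≤ kv.2 := fun kv hkv => h1 kv (by simp [hkv])
      have hkc : 1 ≤ kc.2 := h1 kc (by simp)
      rw [List.foldl_append, List.foldl_cons, List.foldl_nil, ih ht]
      have hc : ((kc.2.toNat : Nat) : Int) = kc.2 := Int.toNat_of_nonneg (by omega)
      have hb := bAddKey_shape
        (fun (i : Nat) => ((t.filter (fun kv => decide ((i : Int) < kv.2))).map (·.1)))
        (maxCnt t) kc.1 kc.2.toNat
      rw [hc] at hb
      rw [hb]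
      have hM : maxCnt (t ++ [kc]) = max (maxCnt t) kc.2.toNat := by
        simp [maxCnt]
      rw [hM]
      refine List.map_congr_left fun a ha => ?_
      have ha' : a < max (maxCnt t) kc.2.toNat := List.mem_range.mp ha
      rw [List.filter_append, List.map_append]
      congr 1
      · by_cases haM : a < maxCnt t
        · rw [if_pos haM]
        · rw [if_neg haM, filter_gt_eq_nil t a ht (by omega)]
          simp
      · rw [List.filter_singleton]
        by_cases hak : a < kc.2.toNat
        · have h4 : (a : Int) < kc.2 := by omega
          rw [if_pos hak]
          simp [h4]
        · have h4 : ¬ (a : Int) < kc.2 := by omega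
          rw [if_neg hak]
          simp [h4]

lemma a_eq_b (collection : List Int) (hpre : collection ≠ []) :
    organize_exhibition collection = organize_exhibition_alt collection := by
  have halt : organize_exhibition_alt collection =
      (PySem.Dict.counter collection).items.foldl (fun walls kc => bAddKey walls kc.1 kc.2) [] := by
    unfold organize_exhibition_alt
    rw [PySem.Dict.foldl_insert_getD_add_one_eq_counter]
  set items := (PySem.Dict.counter collection).items with hitems
  have h1 : ∀ kv ∈ items, 1 ≤ kv.2 := by
    intro kv hkv
    rw [hitems, PySem.Dict.items_counter] at hkv
    obtain ⟨k, hk, rfl⟩ := List.mem_map.mp hkv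
    have : k ∈ collection := (PySem.Set.mem_ofList _ _).mp hk
    have := List.count_pos_iff.mpr this
    simp
    omega
  have hvne : (PySem.Dict.counter collection).values ≠ [] := by
    obtain ⟨x, xs, rfl⟩ := List.exists_cons_of_ne_nil hpre
    have hx : x ∈ PySem.Set.ofList (x :: xs) := (PySem.Set.mem_ofList _ _).mpr (by simp)
    simp only [PySem.Dict.values, PySem.Dict.items_counter]
    intro hnil
    rw [List.map_eq_nil_iff, List.map_eq_nil_iff] at hnil
    rw [hnil] at hx
    simp at hx
  obtain ⟨m, hm⟩ : ∃ m, PySem.List.max? (PySem.Dict.counter collection).values (fun v => v) = some m := by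
    rcases h : PySem.List.max? (PySem.Dict.counter collection).values (fun v => v) with _ | m
    · exact absurd ((PySem.List.max?_eq_none_iff _ _).mp h) hvne
    · exact ⟨m, rfl⟩
  have hmem : m ∈ (PySem.Dict.counter collection).values := PySem.List.max?_mem hm
  have hmax : ∀ y ∈ (PySem.Dict.counter collection).values, y ≤ m := by
    intro y hy
    exact PySem.List.max?_isMax hm y hy
  have hvals : (PySem.Dict.counter collection).values = items.map (·.2) := by
    rw [hitems]; rfl
  have hMm : maxCnt items = m.toNat := by
    apply Nat.le_antisymm
    · apply maxCnt_le _ _ _ (Nat.zero_le _)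
      intro kv hkv
      have : kv.2 ≤ m := hmax _ (by rw [hvals]; exact List.mem_map_of_mem hkv)
      omega
    · rw [hvals] at hmem
      obtain ⟨kv, hkv, hkv2⟩ := List.mem_map.mp hmem
      have := (PySem.List.le_foldl_max_nat items (fun kv => kv.2.toNat) 0).2 kv hkv
      unfold maxCnt
      omega
  simp only [organize_exhibition]
  rw [hm]
  simp only []
  rw [PySem.List.foldl_append_singleton_eq_map, List.nil_append]
  rw [halt, walls_shape items h1, hMm]
  rw [PySem.List.pyRange_one, List.map_map]
  simp only [Int.sub_zero]
  refine List.map_congr_left fun a ha => ?_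
  simp [← hitems]

-- ===== VERDICT (by name: the statement is the Claim_ definition above) =====
theorem organize_exhibition_spec : Claim_equal_organize_exhibition := by
  intro collection _ hpre
  unfold Spec_organize_exhibition
  exact a_eq_b collection hpre
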